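-- pv_equiv track=rewrite | github.com/prajjwalkumarpanzade/SprintTrace | app.py | _filter_fix_versions_single_train
-- ===== SOURCE A (Python) =====
-- def _fixversion_major(version: str) -> int | None:
--     """Leading numeric segment, e.g. '7.1' -> 7, '4.08-performance' -> 4. Unparseable -> None."""
--     raw = str(version).strip().split("-", maxsplit=1)[0].strip()
--     head = raw.split(".", maxsplit=1)[0] if raw else ""
--     return int(head) if head.isdigit() else None
--
-- def _filter_fix_versions_single_train(versions: list[str]) -> list[str]:
--     """When a month mixes majors (e.g. 7.0-7.3 and 8.0), keep only the lowest-major train."""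
--     unique = sorted({v for v in versions if v and str(v).strip()})
--     if len(unique) <= 1:
--         return unique
--     by_major: dict[int, list[str]] = {}
--     for v in unique:
--         m = _fixversion_major(v)
--         if m is None:
--             return unique
--         by_major.setdefault(m, []).append(v)
--     if len(by_major) <= 1:
--         return unique
--     low = min(by_major)
--     return sorted(by_major[low])
-- ===== SOURCE B (Python) =====
-- def _fixversion_major(version: str) -> int | None:
--     """Leading numeric segment, e.g. '7.1' -> 7, '4.08-performance' -> 4. Unparseable -> None."""
--     raw = str(version).strip().split("-", maxsplit=1)[0].strip()
--     head = raw.split(".", maxsplit=1)[0] if raw else ""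
--     return int(head) if head.isdigit() else None
--
-- def _filter_fix_versions_single_train(versions: list[str]) -> list[str]:
--     """Single streaming pass: keep a running minimal major and the versions carrying it;
--     a strictly smaller major resets the kept list, an equal one extends it."""
--     unique = sorted({v for v in versions if v and str(v).strip()})
--     low = None
--     kept = []
--     for v in unique:
--         m = _fixversion_major(v)
--         if m is None:
--             return unique
--         if low is None or m < low:
--             low, kept = m, [v]
--         elif m == low:
--             kept.append(v)
--     return unique if len(kept) == len(unique) else kept
-- ===== Notes on version B (the rewrite author's own statement) =====
-- stated objective: alternative
-- what changed: B replaces A's group-by-major dict plus min-key selection and final re-sort with a single streaming pass that maintains a running minimal major and the kept versions for it (resetting on a smaller major, extending on an equal one), deciding the single-train case by comparing lengths at the end.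
import Mathlib
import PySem

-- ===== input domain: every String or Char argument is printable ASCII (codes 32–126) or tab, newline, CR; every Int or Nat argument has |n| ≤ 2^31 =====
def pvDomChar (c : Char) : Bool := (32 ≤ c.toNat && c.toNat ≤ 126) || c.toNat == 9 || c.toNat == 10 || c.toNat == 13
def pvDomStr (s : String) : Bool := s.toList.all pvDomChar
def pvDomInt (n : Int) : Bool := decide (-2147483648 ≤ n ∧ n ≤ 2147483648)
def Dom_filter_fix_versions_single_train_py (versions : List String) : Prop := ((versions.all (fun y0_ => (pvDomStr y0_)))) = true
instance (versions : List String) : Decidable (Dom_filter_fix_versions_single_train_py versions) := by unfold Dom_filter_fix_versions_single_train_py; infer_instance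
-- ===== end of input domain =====

-- B is an alternative: instead of A's group-by-major dict, min-key selection and final re-sort,
-- it makes one streaming pass keeping a running minimal major and the versions carrying it.

-- ===== PORT A =====
-- shared helper: _fixversion_major (textually identical in Source A and Source B)
def fixversion_major_py (version : String) : Option Int :=
  let raw := PySem.Str.strip
      (((PySem.Str.splitMax? (PySem.Str.strip version) "-" 1).getD []).headD "")
  let head := if raw ≠ "" then ((PySem.Str.splitMax? raw "." 1).getD []).headD "" else ""
  if PySem.Str.strIsdigit head then PySem.Int.ofStr? head else none

-- A's loop over unique: by_major.setdefault(m, []).append(v) is Dict.modify m [] (· ++ [v]);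
-- the early 'return unique' on an unparseable version is the none state of the fold.
def buildByMajor (l : List String) (d : PySem.Dict Int (List String)) :
    Option (PySem.Dict Int (List String)) :=
  l.foldl (fun od v => od.bind (fun d =>
    (fixversion_major_py v).map (fun m => d.modify m [] (· ++ [v])))) (some d)

def filter_fix_versions_single_train_py (versions : List String) : List String :=
  let unique := PySem.List.sorted
      (PySem.Set.ofList (versions.filter (fun v => !(v == "") && !(PySem.Str.strip v == ""))))
      (fun x => x) false
  if unique.length ≤ 1 then unique
  else
    match buildByMajor unique PySem.Dict.empty with
    | none => unique
    | some byMajor =>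
      if byMajor.size ≤ 1 then unique
      else
        match PySem.List.min? byMajor.keys (fun x => x) with
        | none => unique  -- unreachable: by_major is nonempty here
        | some low => PySem.List.sorted (byMajor.getD low []) (fun x => x) false

-- ===== PORT B =====
-- B's single pass over unique: state (low, kept); a strictly smaller major resets kept to [v],
-- an equal one appends v; the early 'return unique' on an unparseable version is the none state.
def lowKeptFold (l : List String) (st : Option (Option Int × List String)) :
    Option (Option Int × List String) :=
  l.foldl (fun ost v => ost.bind (fun st =>
    (fixversion_major_py v).map (fun m =>
      if st.1.isNone || decide (m < st.1.getD 0) then (some m, [v])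
      else if m == st.1.getD 0 then (st.1, st.2 ++ [v])
      else st))) st

def filter_fix_versions_single_train_py_alt (versions : List String) : List String :=
  let unique := PySem.List.sorted
      (PySem.Set.ofList (versions.filter (fun v => !(v == "") && !(PySem.Str.strip v == ""))))
      (fun x => x) false
  match lowKeptFold unique (some (none, [])) with
  | none => unique
  | some st => if st.2.length == unique.length then unique else st.2

-- ===== PRECONDITION & SPEC =====
def Spec_filter_fix_versions_single_train_py (versions : List String) (out : List String) : Prop := out = filter_fix_versions_single_train_py_alt versions
instance (versions : List String) (out : List String) : Decidable (Spec_filter_fix_versions_single_train_py versions out) := by unfold Spec_filter_fix_versions_single_train_py; infer_instance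

-- ===== CLAIM (what is proved, stated in full; the proofs are below) =====
def Claim_equal_filter_fix_versions_single_train_py : Prop := ∀ (versions : List String), Dom_filter_fix_versions_single_train_py versions → Spec_filter_fix_versions_single_train_py versions (filter_fix_versions_single_train_py versions)

-- ===== LEMMAS AND PROOFS =====

theorem foldl_bind_none {α β : Type} (l : List α) (g : β → α → Option β) :
    l.foldl (fun ob a => ob.bind (fun b => g b a)) none = none := by
  induction l with
  | nil => rfl
  | cons a t ih => simpa using ih

theorem build_none (l : List String) (d : PySem.Dict Int (List String))
    (h : ¬ ∀ v ∈ l, (fixversion_major_py v).isSome) : buildByMajor l d = none := by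
  induction l generalizing d with
  | nil => exact absurd (by simp) h
  | cons v rest ih =>
    unfold buildByMajor
    rw [List.foldl_cons]
    cases hv : fixversion_major_py v with
    | none => simpa using foldl_bind_none rest _
    | some m =>
      simp only [Option.bind_some, Option.map_some]
      apply ih
      intro hall
      exact h (by
        intro x hx
        cases hx with
        | head => simp [hv]
        | tail _ h1 => exact hall x h1)

theorem lowKept_none (l : List String) (st : Option Int × List String)
    (h : ¬ ∀ v ∈ l, (fixversion_major_py v).isSome) : lowKeptFold l (some st) = none := by
  induction l generalizing st with
  | nil => exact absurd (by simp) h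
  | cons v rest ih =>
    unfold lowKeptFold
    rw [List.foldl_cons]
    cases hv : fixversion_major_py v with
    | none => simpa using foldl_bind_none rest _
    | some m =>
      simp only [Option.bind_some, Option.map_some]
      apply ih
      intro hall
      exact h (by
        intro x hx
        cases hx with
        | head => simp [hv]
        | tail _ h1 => exact hall x h1)

-- the major of a version that parses (proof abbreviation)
def majorOf (v : String) : Int := (fixversion_major_py v).getD 0

theorem build_some (l : List String) (d : PySem.Dict Int (List String))
    (h : ∀ v ∈ l, (fixversion_major_py v).isSome) :
    buildByMajor l d = some ((l.map (fun v => (majorOf v, v))).foldl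
      (fun d p => d.modify p.1 [] (· ++ [p.2])) d) := by
  induction l generalizing d with
  | nil => rfl
  | cons v rest ih =>
    have hv : (fixversion_major_py v).isSome := h v (by simp)
    cases hv' : fixversion_major_py v with
    | none => simp [hv'] at hv
    | some m =>
      unfold buildByMajor
      rw [List.foldl_cons]
      simp only [Option.bind_some, hv', Option.map_some, List.map_cons, List.foldl_cons,
        majorOf, Option.getD_some]
      exact ih _ (fun x hx => h x (by simp [hx]))

theorem lowKeptFold_cons (v : String) (l : List String)
    (st : Option Int × List String) :
    lowKeptFold (v :: l) (some st) = lowKeptFold l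
      ((fixversion_major_py v).map (fun m =>
        if st.1.isNone || decide (m < st.1.getD 0) then (some m, [v])
        else if m == st.1.getD 0 then (st.1, st.2 ++ [v])
        else st)) := by
  simp only [lowKeptFold, List.foldl_cons, Option.bind_some]

theorem foldl_min_le (ms : List Int) (a : Int) : ms.foldl min a ≤ a := by
  induction ms generalizing a with
  | nil => simp
  | cons b t ih => exact le_trans (ih (min a b)) (min_le_left a b)

-- running-pass invariant: from state (some lo, kept), the pass ends with the minimum L of
-- lo and the remaining majors, keeping (kept if L = lo else []) ++ the versions of major L
theorem lowKept_inv (l : List String) (h : ∀ v ∈ l, (fixversion_major_py v).isSome)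
    (lo : Int) (kept : List String) :
    lowKeptFold l (some (some lo, kept)) =
      some (some ((l.map majorOf).foldl min lo),
        (if (l.map majorOf).foldl min lo = lo then kept else []) ++
          l.filter (fun v => majorOf v == (l.map majorOf).foldl min lo)) := by
  induction l generalizing lo kept with
  | nil => simp [lowKeptFold]
  | cons v rest ih =>
    have hv : (fixversion_major_py v).isSome := h v (by simp)
    cases hv' : fixversion_major_py v with
    | none => simp [hv'] at hv
    | some m =>
      have hm : majorOf v = m := by simp [majorOf, hv']
      have hrest : ∀ x ∈ rest, (fixversion_major_py x).isSome :=
        fun x hx => h x (by simp [hx])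
      rw [lowKeptFold_cons]
      simp only [hv', Option.map_some, Option.isNone_some, Bool.false_or,
        Option.getD_some]
      simp only [List.map_cons, List.foldl_cons, hm]
      rcases lt_trichotomy m lo with hlt | heq | hgt
      · -- strictly smaller major: reset kept to [v]
        rw [if_pos (by simpa using hlt)]
        rw [ih hrest m [v]]
        have hminlm : min lo m = m := min_eq_right (le_of_lt hlt)
        have hLm : (rest.map majorOf).foldl min m ≤ m := foldl_min_le _ m
        have hLlo : (rest.map majorOf).foldl min m ≠ lo := by omega
        rw [hminlm]
        rw [if_neg hLlo, List.nil_append, List.filter_cons]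
        by_cases hLem : (rest.map majorOf).foldl min m = m
        · rw [if_pos hLem]
          simp [hm, hLem]
        · rw [if_neg hLem]
          have : ¬ (majorOf v == (rest.map majorOf).foldl min m) = true := by
            simp [hm]; omega
          simp [this]
      · -- equal major: append v to kept
        subst heq
        rw [if_neg (by simp), if_pos (by simp)]
        rw [ih hrest m (kept ++ [v])]
        rw [min_self]
        rw [List.filter_cons]
        by_cases hLem : (rest.map majorOf).foldl min m = m
        · rw [if_pos hLem, if_pos hLem]
          simp [hm, hLem]
        · rw [if_neg hLem, if_neg hLem]
          have : ¬ (majorOf v == (rest.map majorOf).foldl min m) = true := by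
            simp [hm]; exact fun h' => hLem h'.symm
          simp [this]
      · -- larger major: state unchanged, v dropped
        rw [if_neg (by simpa using not_lt.mpr (le_of_lt hgt)),
          if_neg (by simp; omega)]
        rw [ih hrest lo kept]
        have hminlm : min lo m = lo := min_eq_left (le_of_lt hgt)
        have hLlo : (rest.map majorOf).foldl min lo ≤ lo := foldl_min_le _ lo
        rw [hminlm]
        rw [List.filter_cons]
        have : ¬ (majorOf v == (rest.map majorOf).foldl min lo) = true := by
          simp [hm]; omega
        simp [this]

-- full characterisation on a nonempty all-parsing list, starting from Python's (None, [])
theorem lowKept_char (v : String) (rest : List String)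
    (h : ∀ x ∈ v :: rest, (fixversion_major_py x).isSome) :
    lowKeptFold (v :: rest) (some (none, [])) =
      some (some ((rest.map majorOf).foldl min (majorOf v)),
        (v :: rest).filter (fun x => majorOf x == (rest.map majorOf).foldl min (majorOf v))) := by
  have hv : (fixversion_major_py v).isSome := h v (by simp)
  cases hv' : fixversion_major_py v with
  | none => simp [hv'] at hv
  | some m =>
    have hm : majorOf v = m := by simp [majorOf, hv']
    have hrest : ∀ x ∈ rest, (fixversion_major_py x).isSome :=
      fun x hx => h x (by simp [hx])
    rw [lowKeptFold_cons]
    simp only [hv', Option.map_some, Option.isNone_none, Bool.true_or, if_pos]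
    rw [lowKept_inv rest hrest m [v]]
    rw [hm, List.filter_cons]
    have hLm : (rest.map majorOf).foldl min m ≤ m := foldl_min_le _ m
    by_cases hLem : (rest.map majorOf).foldl min m = m
    · rw [if_pos hLem]
      simp [hm, hLem]
    · rw [if_neg hLem]
      have : ¬ (majorOf v == (rest.map majorOf).foldl min m) = true := by
        simp [hm]; exact fun h' => hLem h'.symm
      simp [this]

theorem min_val_eq (xs ys : List Int) (hm : ∀ x, x ∈ xs ↔ x ∈ ys) :
    PySem.List.min? xs (fun x => x) = PySem.List.min? ys (fun x => x) := by
  cases hx : PySem.List.min? xs (fun x => x) with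
  | none =>
    have hxs : xs = [] := (PySem.List.min?_eq_none_iff _ _).1 hx
    have hys : ys = [] := by
      cases hyc : ys with
      | nil => rfl
      | cons b t =>
        have : b ∈ xs := (hm b).2 (by simp [hyc])
        simp [hxs] at this
    rw [hys, (PySem.List.min?_eq_none_iff _ _).2 rfl]
  | some a =>
    cases hy : PySem.List.min? ys (fun x => x) with
    | none =>
      have hys : ys = [] := (PySem.List.min?_eq_none_iff _ _).1 hy
      have ha : a ∈ ys := (hm a).1 (PySem.List.min?_mem hx)
      simp [hys] at ha
    | some b =>
      have hab : a ≤ b := PySem.List.min?_isMin hx b ((hm b).2 (PySem.List.min?_mem hy))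
      have hba : b ≤ a := PySem.List.min?_isMin hy a ((hm a).1 (PySem.List.min?_mem hx))
      simp [le_antisymm hab hba]

theorem filter_pairs_snd (l : List String) (g : String → Int) (c : Int) :
    ((l.map (fun v => (g v, v))).filter (fun p => p.1 == c)).map (fun p => p.2)
      = l.filter (fun v => g v == c) := by
  induction l with
  | nil => rfl
  | cons v rest ih =>
    by_cases hv : g v = c <;> simp [hv, ih]

theorem keys_of_group_fold (l : List String) (g : String → Int) :
    ((l.map (fun v => (g v, v))).foldl (fun d p => d.modify p.1 [] (· ++ [p.2]))
      PySem.Dict.empty).keys = PySem.Set.ofList (l.map g) := by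
  rw [PySem.Dict.keys_foldl_modify_key, List.map_map]
  rw [show (Prod.fst ∘ fun v => ((g v : Int), v)) = g from rfl]
  rfl

theorem getD_of_group_fold (l : List String) (g : String → Int) (c : Int) :
    ((l.map (fun v => (g v, v))).foldl (fun d p => d.modify p.1 [] (· ++ [p.2]))
      PySem.Dict.empty).getD c [] = l.filter (fun v => g v == c) := by
  rw [PySem.Dict.getD_foldl_modify_append]
  rw [show (PySem.Dict.empty : PySem.Dict Int (List String)).getD c [] = [] from rfl]
  rw [List.nil_append]
  exact filter_pairs_snd l g c

theorem nodup_const_len_le_one {α : Type} (l : List α) (c : α)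
    (hnd : l.Nodup) (hall : ∀ x ∈ l, x = c) : l.length ≤ 1 := by
  match l with
  | [] => simp
  | [a] => simp
  | a :: b :: t =>
    exfalso
    have ha := hall a (by simp)
    have hb := hall b (by simp)
    rw [List.nodup_cons] at hnd
    exact hnd.1 (by simp [ha, hb])

set_option maxHeartbeats 1000000 in
theorem filter_fix_versions_single_train_py_spec : Claim_equal_filter_fix_versions_single_train_py := by
  unfold Claim_equal_filter_fix_versions_single_train_py Spec_filter_fix_versions_single_train_py
  intro versions _
  simp only [filter_fix_versions_single_train_py, filter_fix_versions_single_train_py_alt]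
  set u := PySem.List.sorted
      (PySem.Set.ofList (versions.filter (fun v => !(v == "") && !(PySem.Str.strip v == ""))))
      (fun x : String => x) false with hu
  clear_value u
  by_cases hall : ∀ v ∈ u, (fixversion_major_py v).isSome
  · -- every unique version parses
    match hueq : u with
    | [] => simp [lowKeptFold]
    | v :: rest =>
      rw [lowKept_char v rest hall]
      set L := (rest.map majorOf).foldl min (majorOf v) with hL
      set kept := (v :: rest).filter (fun x => majorOf x == L) with hkept
      clear_value L kept
      have hpw : List.Pairwise (· < ·) (v :: rest) := by
        rw [hu]; exact PySem.List.sorted_ofList_pairwise_lt _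
      have hsubl : kept.Sublist (v :: rest) := by rw [hkept]; exact List.filter_sublist
      have hkept_iff : kept.length = (v :: rest).length ↔
          ∀ x ∈ (v :: rest), majorOf x = L := by
        constructor
        · intro hlen
          have := hsubl.eq_of_length hlen
          rw [hkept] at this
          intro x hx
          have := List.filter_eq_self.1 this x hx
          simpa using this
        · intro h'
          rw [hkept, List.filter_eq_self.2 (fun x hx => by simp [h' x hx])]
      by_cases hlen1 : (v :: rest).length ≤ 1
      · -- singleton: A's early exit; B keeps everything
        have hrnil : rest = [] := by
          cases rest with
          | nil => rfl
          | cons a t => simp at hlen1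
        subst hrnil
        rw [if_pos hlen1]
        have hk1 : kept.length = [v].length := by
          rw [hkept_iff]
          intro x hx
          simp at hx
          simp [hx, hL]
        show ([v] : List String) =
          (if (kept.length == ([v] : List String).length) = true then [v] else kept)
        rw [if_pos (by simpa using hk1)]
      · rw [if_neg hlen1]
        rw [build_some _ PySem.Dict.empty hall]
        set dd := (((v :: rest).map (fun x => (majorOf x, x))).foldl
          (fun d p => d.modify p.1 [] (· ++ [p.2])) PySem.Dict.empty) with hdd
        have hkeys : dd.keys = PySem.Set.ofList ((v :: rest).map majorOf) := by
          rw [hdd]; exact keys_of_group_fold _ majorOf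
        have hget : ∀ c, dd.getD c [] = (v :: rest).filter (fun x => majorOf x == c) := by
          intro c; rw [hdd]; exact getD_of_group_fold _ majorOf c
        have hmin : PySem.List.min? dd.keys (fun x => x) = some L := by
          rw [min_val_eq dd.keys ((v :: rest).map majorOf)
            (fun x => by rw [hkeys]; exact PySem.Set.mem_ofList _ _)]
          rw [List.map_cons, PySem.List.min?_id_cons, hL]
        have hkeyslen : dd.keys.length = dd.size := by
          simp [PySem.Dict.keys, PySem.Dict.size]
        show (if dd.size ≤ 1 then (v :: rest)
            else
              match PySem.List.min? dd.keys (fun x => x) with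
              | none => (v :: rest)
              | some low => PySem.List.sorted (dd.getD low []) (fun x => x) false)
          = (if (kept.length == (v :: rest).length) = true then (v :: rest) else kept)
        have hsize_iff : dd.size ≤ 1 ↔ ∀ x ∈ (v :: rest), majorOf x = L := by
          constructor
          · intro hsz x hx
            have hx' : majorOf x ∈ dd.keys := by
              rw [hkeys]
              exact (PySem.Set.mem_ofList _ _).2 (List.mem_map_of_mem hx)
            have hL' : L ∈ dd.keys := by
              rw [hkeys]
              apply (PySem.Set.mem_ofList _ _).2
              rw [List.map_cons]
              exact PySem.List.min?_mem (m := L) (by rw [PySem.List.min?_id_cons, hL])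
            rcases hk : dd.keys with _ | ⟨k, t⟩
            · simp [hk] at hx'
            · have htlen : t.length = 0 := by
                rw [hk] at hkeyslen
                simp at hkeyslen
                omega
              have ht : t = [] := List.eq_nil_of_length_eq_zero htlen
              subst ht
              simp [hk] at hx' hL'
              omega
          · intro h'
            rw [← hkeyslen]
            apply nodup_const_len_le_one dd.keys L
            · rw [hkeys]; exact PySem.Set.nodup_ofList _
            · intro x hx
              rw [hkeys] at hx
              rcases List.mem_map.1 ((PySem.Set.mem_ofList _ _).1 hx) with ⟨y, hy, hxy⟩
              rw [← hxy]
              exact h' y hy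
        by_cases hone : ∀ x ∈ (v :: rest), majorOf x = L
        · -- single major: A's early exit; B's kept is the whole list
          rw [if_pos (hsize_iff.2 hone)]
          rw [if_pos (by simpa using hkept_iff.2 hone)]
        · rw [if_neg (fun h' => hone (hsize_iff.1 h'))]
          rw [hmin]
          show PySem.List.sorted (dd.getD L []) (fun x => x) false
            = (if (kept.length == (v :: rest).length) = true then (v :: rest) else kept)
          rw [hget L, ← hkept]
          have hlenne : ¬ kept.length = (v :: rest).length := fun h' => hone (hkept_iff.1 h')
          rw [if_neg (by simpa using hlenne)]
          -- unique is strictly increasing, so its filtered sublist is already sorted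
          apply PySem.List.sorted_eq_self_of_pairwise
          rw [hkept]
          exact ((hpw.filter _).imp (fun h => le_of_lt h))
  · rw [build_none u PySem.Dict.empty hall, lowKept_none u _ hall]
    split <;> rfl

-- ===== VERDICT: the theorem filter_fix_versions_single_train_py_spec above proves Claim_equal_filter_fix_versions_single_train_py =====
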